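-- pv_equiv track=rewrite | github.com/Stamaks/FourRussiansImplementation | src/lib/matrices_multiplication.py | get_compressed_matrix
-- ===== SOURCE A (Python) =====
-- import math
--
-- def get_cmprsd_matr_size(size_n, vector_size):
--     return math.ceil(size_n / vector_size)
--
-- def get_compressed_matrix(matrix, size_n, vector_size, is_first_matrix=True):  # O(n^2)
--     size_cmprsd = get_cmprsd_matr_size(size_n, vector_size)
--
--     if is_first_matrix:
--         cmprsd_matrix = [[0] * size_cmprsd for _ in range(size_n)]
--     else:
--         cmprsd_matrix = [[0] * size_n for _ in range(size_cmprsd)]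
--
--     for i in range(size_n):
--         for cmprsd_ind, j in enumerate(range(0, size_n, vector_size)):  # from 0 to n, step log_n
--             number = 0
--             degree = 0
--             for vec_ind in range(min(j + vector_size - 1, size_n - 1), j - 1, -1):
--                 if is_first_matrix:
--                     number += matrix[i][vec_ind] * 2 ** degree
--                 else:
--                     number += matrix[vec_ind][i] * 2 ** degree
--                 degree += 1
--
--             if is_first_matrix:
--                 cmprsd_matrix[i][cmprsd_ind] = number
--             else:
--                 cmprsd_matrix[cmprsd_ind][i] = number
--
--     return cmprsd_matrix
-- ===== SOURCE B (Python) =====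
-- def get_compressed_matrix(matrix, size_n, vector_size, is_first_matrix=True):
--     # Block-column at a time: for each block of positions, Horner-update a whole
--     # vector of accumulators (one per row/column index) at once, then assemble the
--     # result by transposition instead of writing into a preallocated zero matrix.
--     n = size_n if size_n > 0 else 0
--     starts = range(0, n, vector_size) if vector_size > 0 else []
--     block_cols = []
--     for start in starts:
--         acc = [0] * n
--         stop = start + vector_size if start + vector_size < n else n
--         for pos in range(start, stop):
--             acc = [2 * a + (matrix[i][pos] if is_first_matrix else matrix[pos][i])
--                    for i, a in enumerate(acc)]
--         block_cols.append(acc)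
--     if not is_first_matrix:
--         return block_cols
--     return [[col[i] for col in block_cols] for i in range(n)]
-- ===== Notes on version B (the rewrite author's own statement) =====
-- stated objective: alternative
-- what changed: B inverts the loop nest: it walks each block of positions once and Horner-updates a whole vector of per-row accumulators at a time (no per-cell inner loop and no powers of two), then assembles the result by transposition instead of A's indexed writes into a preallocated zero matrix.
-- outside the precondition, e.g. on get_compressed_matrix([[]], -2, -2, False): A returns [[]], B returns []
import Mathlib
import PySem

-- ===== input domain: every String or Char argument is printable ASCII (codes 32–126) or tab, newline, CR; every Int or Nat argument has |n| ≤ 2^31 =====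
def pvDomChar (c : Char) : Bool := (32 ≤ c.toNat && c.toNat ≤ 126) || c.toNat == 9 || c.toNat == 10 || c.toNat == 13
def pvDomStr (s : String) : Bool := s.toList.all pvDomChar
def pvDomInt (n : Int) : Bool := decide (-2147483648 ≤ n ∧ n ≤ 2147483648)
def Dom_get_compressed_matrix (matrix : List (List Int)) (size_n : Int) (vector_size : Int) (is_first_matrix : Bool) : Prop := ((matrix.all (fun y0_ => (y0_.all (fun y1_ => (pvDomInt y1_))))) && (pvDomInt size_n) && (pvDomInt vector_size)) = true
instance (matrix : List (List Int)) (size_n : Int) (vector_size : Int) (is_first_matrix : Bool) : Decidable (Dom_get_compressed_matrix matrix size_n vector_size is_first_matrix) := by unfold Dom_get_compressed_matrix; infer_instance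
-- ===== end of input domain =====

-- B packs the same block numbers by walking each block of positions once and Horner-updating a
-- whole vector of per-row accumulators at a time, assembling the result by transposition instead
-- of A's per-cell inner loop with powers of two writing into a preallocated zero matrix.

-- ===== PORT A =====
-- math.ceil(size_n / vector_size): on |size_n|,|vector_size| ≤ 2^31 the float quotient never
-- rounds across an integer, so this ceiling division is exact (ported by hand; exact there).
def get_cmprsd_matr_size (size_n : Int) (vector_size : Int) : Int :=
  -(PySem.Int.floordiv (-size_n) vector_size)

def get_compressed_matrix (matrix : List (List Int)) (size_n : Int) (vector_size : Int) (is_first_matrix : Bool) : List (List Int) :=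
  let size_cmprsd := get_cmprsd_matr_size size_n vector_size
  let init : List (List Int) :=
    if is_first_matrix then
      List.replicate size_n.toNat (List.replicate size_cmprsd.toNat 0)
    else
      List.replicate size_cmprsd.toNat (List.replicate size_n.toNat 0)
  (PySem.List.pyRange 0 size_n 1).foldl (fun cm i =>
    (PySem.List.enumerate (PySem.List.pyRange 0 size_n vector_size)).foldl (fun cm2 p =>
      let number :=
        ((PySem.List.pyRange (min (p.2 + vector_size - 1) (size_n - 1)) (p.2 - 1) (-1)).foldl
          (fun (st : Int × Int) vec_ind =>
            (st.1 + (if is_first_matrix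
                     then PySem.List.pyGetD (PySem.List.pyGetD matrix i []) vec_ind 0
                     else PySem.List.pyGetD (PySem.List.pyGetD matrix vec_ind []) i 0) * 2 ^ st.2.toNat,
             st.2 + 1)) ((0 : Int), (0 : Int))).1
      if is_first_matrix then
        PySem.List.pySetD cm2 i (PySem.List.pySetD (PySem.List.pyGetD cm2 i []) p.1 number)
      else
        PySem.List.pySetD cm2 p.1 (PySem.List.pySetD (PySem.List.pyGetD cm2 p.1 []) i number)
    ) cm) init

-- ===== PORT B =====
def get_compressed_matrix_alt (matrix : List (List Int)) (size_n : Int) (vector_size : Int) (is_first_matrix : Bool) : List (List Int) :=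
  let n : Int := if size_n > 0 then size_n else 0
  let starts : List Int := if 0 < vector_size then PySem.List.pyRange 0 n vector_size else []
  let block_cols : List (List Int) := starts.foldl (fun bc start =>
    let stop : Int := if start + vector_size < n then start + vector_size else n
    let acc := (PySem.List.pyRange start stop 1).foldl (fun acc pos =>
        (PySem.List.enumerate acc).map (fun p =>
          2 * p.2 + (if is_first_matrix
                     then PySem.List.pyGetD (PySem.List.pyGetD matrix p.1 []) pos 0
                     else PySem.List.pyGetD (PySem.List.pyGetD matrix pos []) p.1 0)))
      (List.replicate n.toNat (0 : Int))
    bc ++ [acc]) []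
  if !is_first_matrix then block_cols
  else (PySem.List.pyRange 0 n 1).map (fun i => block_cols.map (fun col => PySem.List.pyGetD col i 0))

-- ===== PRECONDITION & SPEC =====
-- Pre_ excludes: vector_size = 0, on which A raises ZeroDivisionError; matrices with fewer than
-- size_n rows (or a row among the first size_n shorter than size_n) with 0 < vector_size, on which
-- A raises IndexError; and negative size_n combined with negative vector_size in the second
-- layout, a meaningless dimension on which A's ceil-division accidentally manufactures a
-- nonempty list of empty rows.
def Pre_get_compressed_matrix (matrix : List (List Int)) (size_n : Int) (vector_size : Int) (is_first_matrix : Bool) : Prop :=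
  vector_size ≠ 0 ∧
  (0 < vector_size → size_n ≤ (matrix.length : Int) ∧
    ∀ row ∈ matrix.take size_n.toNat, size_n ≤ (row.length : Int)) ∧
  (vector_size < 0 → 0 ≤ size_n ∨ is_first_matrix = true)
instance (matrix : List (List Int)) (size_n : Int) (vector_size : Int) (is_first_matrix : Bool) : Decidable (Pre_get_compressed_matrix matrix size_n vector_size is_first_matrix) := by unfold Pre_get_compressed_matrix; infer_instance

def pvWitness_get_compressed_matrix : List (List Int) × Int × Int × Bool := ([[1, 0, 1], [1, 1, 0], [0, 1, 1]], 3, 2, true)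

def Spec_get_compressed_matrix (matrix : List (List Int)) (size_n : Int) (vector_size : Int) (is_first_matrix : Bool) (out : List (List Int)) : Prop := out = get_compressed_matrix_alt matrix size_n vector_size is_first_matrix
instance (matrix : List (List Int)) (size_n : Int) (vector_size : Int) (is_first_matrix : Bool) (out : List (List Int)) : Decidable (Spec_get_compressed_matrix matrix size_n vector_size is_first_matrix out) := by unfold Spec_get_compressed_matrix; infer_instance

-- ===== CLAIM (what is proved, stated in full; the proofs are below) =====
def Claim_equal_get_compressed_matrix : Prop := ∀ (matrix : List (List Int)) (size_n : Int) (vector_size : Int) (is_first_matrix : Bool), Dom_get_compressed_matrix matrix size_n vector_size is_first_matrix → Pre_get_compressed_matrix matrix size_n vector_size is_first_matrix → Spec_get_compressed_matrix matrix size_n vector_size is_first_matrix (get_compressed_matrix matrix size_n vector_size is_first_matrix)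

-- ===== LEMMAS AND PROOFS =====

def pvHorner (f : Int → Int) (ps : List Int) : Int := ps.foldl (fun a pos => 2 * a + f pos) 0

-- A's power accumulation over a list = Horner over its reverse
theorem pv_pow_fold (f : Int → Int) :
    ∀ (l : List Int) (a d : Int), 0 ≤ d →
    (l.foldl (fun (st : Int × Int) x => (st.1 + f x * 2 ^ st.2.toNat, st.2 + 1)) (a, d)).1
      = a + 2 ^ d.toNat * pvHorner f l.reverse := by
  intro l
  induction l with
  | nil => intro a d _; simp [pvHorner]
  | cons x t ih =>
    intro a d hd
    have h1 : (d + 1).toNat = d.toNat + 1 := by omega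
    simp only [List.foldl_cons, List.reverse_cons]
    rw [ih _ (d + 1) (by omega)]
    have h2 : pvHorner f (t.reverse ++ [x]) = 2 * pvHorner f t.reverse + f x := by
      simp [pvHorner, List.foldl_append]
    rw [h2, h1, pow_succ]
    ring

theorem pv_getD_map_range_int {β : Type} (h : Nat → β) (n k : Nat) (d : β) (hk : k < n) :
    PySem.List.pyGetD ((List.range n).map h) (k : Int) d = h k := by
  rw [PySem.List.pyGetD_natCast, PySem.List.getD_map_range h n k d hk]

theorem pv_set_map_range {β : Type} (h : Nat → β) (n a : Nat) (v : β) (_ha : a < n) :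
    ((List.range n).map h).set a v = (List.range n).map (fun k => if k = a then v else h k) := by
  apply List.ext_getElem
  · simp
  · intro k hk1 hk2
    simp only [List.length_set, List.length_map, List.length_range] at hk1
    rw [List.getElem_set]
    simp only [List.getElem_map, List.getElem_range]
    by_cases hk : k = a
    · simp [hk]
    · rw [if_neg (fun h' => hk h'.symm), if_neg hk]

theorem pv_enum_map_ext {α β : Type} (xs : List α) (W : Int → α → β) (dflt : α) :
    (PySem.List.enumerate xs 0).map (fun p => W p.1 p.2)
      = (List.range xs.length).map (fun (k : Nat) => W (k : Int) (xs.getD k dflt)) := by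
  apply List.ext_getElem
  · simp [PySem.List.length_enumerate]
  · intro k hk1 hk2
    simp only [List.length_map, PySem.List.length_enumerate] at hk1
    simp only [List.getElem_map, List.getElem_range]
    rw [PySem.List.getElem_enumerate]
    simp [List.getD_eq_getElem?_getD, List.getElem?_eq_getElem hk1]

theorem pv_enumfill {α : Type} (d : α) (G : Int → Int → α → α) :
    ∀ (xs : List Int) (s : Nat) (row : List α), row.length = s + xs.length →
    (PySem.List.enumerate xs (s : Int)).foldl
        (fun r p => PySem.List.pySetD r p.1 (G p.1 p.2 (PySem.List.pyGetD r p.1 d))) row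
      = row.take s ++ (PySem.List.enumerate xs (s : Int)).map (fun p => G p.1 p.2 (PySem.List.pyGetD row p.1 d)) := by
  intro xs
  induction xs with
  | nil =>
    intro s row hlen
    simp at hlen
    simp [PySem.List.enumerate, List.take_of_length_le (le_of_eq hlen)]
  | cons x t ih =>
    intro s row hlen
    have hs : s < row.length := by simp at hlen; omega
    rw [PySem.List.enumerate_cons]
    simp only [List.foldl_cons, List.map_cons]
    have hcast : (s : Int) + 1 = ((s + 1 : Nat) : Int) := by push_cast; ring
    set v := G (s : Int) x (PySem.List.pyGetD row (s : Int) d) with hv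
    have hr1 : PySem.List.pySetD row (s : Int) v = row.set s v := PySem.List.pySetD_natCast row s v
    rw [hr1, hcast]
    rw [ih (s + 1) (row.set s v) (by simp at hlen ⊢; omega)]
    have htake : (row.set s v).take (s + 1) = row.take s ++ [v] := by
      rw [List.set_eq_take_append_cons_drop, if_pos hs]
      rw [List.take_append]
      have h1 : (row.take s).length = s := by simp [List.length_take]; omega
      rw [List.take_of_length_le (by omega), h1]
      simp
    have hmap : (PySem.List.enumerate t ((s + 1 : Nat) : Int)).map
          (fun p => G p.1 p.2 (PySem.List.pyGetD (row.set s v) p.1 d))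
        = (PySem.List.enumerate t ((s + 1 : Nat) : Int)).map
          (fun p => G p.1 p.2 (PySem.List.pyGetD row p.1 d)) := by
      apply List.map_congr_left
      intro p hp
      rw [PySem.List.mem_enumerate_iff] at hp
      obtain ⟨k, hk, hpk⟩ := hp
      have hp1 : p.1 = ((s + 1 + k : Nat) : Int) := by rw [hpk]; push_cast; ring
      rw [hp1, ← hr1, PySem.List.pyGetD_pySetD_natCast row s (s + 1 + k) v d hs,
        if_neg (by omega)]
    rw [hmap, htake, List.append_assoc, List.singleton_append]

theorem pv_vecfold (g : Int → Int → Int) (nN : Nat) :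
    ∀ (ps : List Int) (h : Nat → Int),
    ps.foldl (fun acc pos => (PySem.List.enumerate acc).map
        (fun p => 2 * p.2 + g p.1 pos)) ((List.range nN).map h)
      = (List.range nN).map (fun (k : Nat) => ps.foldl (fun a pos => 2 * a + g (k : Int) pos) (h k)) := by
  intro ps
  induction ps with
  | nil => intro h; simp
  | cons pos rest ih =>
    intro h
    simp only [List.foldl_cons]
    rw [pv_enum_map_ext ((List.range nN).map h) (fun i a => 2 * a + g i pos) 0]
    have hstep : (List.range ((List.range nN).map h).length).map
          (fun (k : Nat) => 2 * (((List.range nN).map h).getD k 0) + g (k : Int) pos)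
        = (List.range nN).map (fun (k : Nat) => 2 * h k + g (k : Int) pos) := by
      rw [List.length_map, List.length_range]
      apply List.map_congr_left
      intro k hk
      rw [PySem.List.getD_map_range h nN k 0 (List.mem_range.mp hk)]
    rw [hstep, ih (fun (k : Nat) => 2 * h k + g (k : Int) pos)]

theorem pv_set_get_fold (V : Int × Int → Int) (i : Int) (hi0 : 0 ≤ i) :
    ∀ (E : List (Int × Int)) (cm : List (List Int)), i < (cm.length : Int) →
    E.foldl (fun cm2 p => PySem.List.pySetD cm2 i
        (PySem.List.pySetD (PySem.List.pyGetD cm2 i []) p.1 (V p))) cm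
      = PySem.List.pySetD cm i
          (E.foldl (fun row p => PySem.List.pySetD row p.1 (V p)) (PySem.List.pyGetD cm i [])) := by
  intro E
  induction E with
  | nil =>
    intro cm hlen
    simp only [List.foldl_nil]
    have hi : i = ((i.toNat : Nat) : Int) := by omega
    rw [hi, PySem.List.pySetD_natCast, PySem.List.pyGetD_natCast,
      List.getD_eq_getElem _ _ (by omega), List.set_getElem_self]
  | cons x E ih =>
    intro cm hlen
    simp only [List.foldl_cons]
    have hi : i = ((i.toNat : Nat) : Int) := by omega
    have hlt : i.toNat < cm.length := by omega
    rw [ih _ (by rw [PySem.List.length_pySetD]; omega)]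
    rw [hi]
    simp only [PySem.List.pySetD_natCast, PySem.List.pyGetD_natCast]
    rw [List.getD_eq_getElem _ _ hlt]
    rw [List.getD_eq_getElem _ _ (by simpa using hlt), List.getElem_set_self, List.set_set]

theorem pv_first_fold (F : Int → List Int → List Int) (nN : Nat)
    (S : List (List Int) → Int → List (List Int))
    (hS : ∀ (h : Nat → List Int) (i : Int), 0 ≤ i → i < (nN : Int) →
      S ((List.range nN).map h) i
        = PySem.List.pySetD ((List.range nN).map h) i
            (F i (PySem.List.pyGetD ((List.range nN).map h) i []))) :
    ∀ (l : List Int), (∀ i ∈ l, 0 ≤ i ∧ i < (nN : Int)) → ∀ (h : Nat → List Int),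
    l.foldl S ((List.range nN).map h)
      = (List.range nN).map (fun (r : Nat) =>
          l.foldl (fun row i => if i = (r : Int) then F i row else row) (h r)) := by
  intro l
  induction l with
  | nil => intro _ h; simp
  | cons x t ih =>
    intro hb h
    obtain ⟨hx0, hxn⟩ := hb x (by simp)
    simp only [List.foldl_cons]
    rw [hS h x hx0 hxn]
    have hxN : x = ((x.toNat : Nat) : Int) := by omega
    have hlt : x.toNat < nN := by omega
    rw [hxN, PySem.List.pySetD_natCast, pv_getD_map_range_int h nN x.toNat [] hlt,
      pv_set_map_range h nN x.toNat _ hlt]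
    rw [ih (fun i hi => hb i (by simp [hi])) (fun k => if k = x.toNat then F ((x.toNat : Nat) : Int) (h x.toNat) else h k)]
    apply List.map_congr_left
    intro r hr
    by_cases hre : r = x.toNat
    · subst hre
      rw [if_pos rfl, if_pos rfl]
    · rw [if_neg hre, if_neg (by omega)]

theorem pv_pick (F : Int → List Int → List Int) (n : Int) (r : Nat) (hr : (r : Int) < n)
    (row : List Int) :
    (PySem.List.pyRange 0 n 1).foldl (fun row i => if i = (r : Int) then F i row else row) row
      = F (r : Int) row := by
  rw [PySem.List.pyRange_one_append 0 (r : Int) n (by omega) (by omega),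
    PySem.List.pyRange_one_append (r : Int) ((r : Int) + 1) n (by omega) (by omega),
    List.foldl_append, List.foldl_append]
  rw [PySem.List.foldl_congr_mem _ _ (fun row i => row) _ (by
    intro acc x hx
    rw [PySem.List.mem_pyRange_one] at hx
    rw [if_neg (by omega)])]
  rw [PySem.List.foldl_ignore, PySem.List.pyRange_one_singleton, List.foldl_cons,
    List.foldl_nil, if_pos rfl]
  rw [PySem.List.foldl_congr_mem _ _ (fun row i => row) _ (by
    intro acc x hx
    rw [PySem.List.mem_pyRange_one] at hx
    rw [if_neg (by omega)])]
  rw [PySem.List.foldl_ignore]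

theorem pv_second_fold (starts : List Int) (N : Int → Int → Int) (scN : Nat)
    (hsc : starts.length = scN) :
    ∀ (l : List Int) (h : Nat → List Int),
    l.foldl (fun cm i => (PySem.List.enumerate starts).foldl
        (fun cm2 p => PySem.List.pySetD cm2 p.1
          (PySem.List.pySetD (PySem.List.pyGetD cm2 p.1 []) i (N p.2 i))) cm)
      ((List.range scN).map h)
      = (List.range scN).map (fun (k : Nat) =>
          l.foldl (fun row i => PySem.List.pySetD row i (N (starts.getD k 0) i)) (h k)) := by
  intro l
  induction l with
  | nil => intro h; simp
  | cons x t ih =>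
    intro h
    simp only [List.foldl_cons]
    have hstep : (PySem.List.enumerate starts).foldl
        (fun cm2 p => PySem.List.pySetD cm2 p.1
          (PySem.List.pySetD (PySem.List.pyGetD cm2 p.1 []) x (N p.2 x)))
        ((List.range scN).map h)
        = (List.range scN).map (fun (k : Nat) =>
            PySem.List.pySetD (h k) x (N (starts.getD k 0) x)) := by
      have h0 : ((List.range scN).map h).length = 0 + starts.length := by simp [hsc]
      have := pv_enumfill ([] : List Int)
        (fun _ j row => PySem.List.pySetD row x (N j x)) starts 0 ((List.range scN).map h) h0
      simp only [Nat.cast_zero, List.take_zero, List.nil_append] at this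
      rw [this]
      rw [pv_enum_map_ext starts
        (fun q a => PySem.List.pySetD (PySem.List.pyGetD ((List.range scN).map h) q []) x (N a x)) 0]
      rw [hsc]
      apply List.map_congr_left
      intro k hk
      rw [pv_getD_map_range_int h scN k [] (List.mem_range.mp hk)]
    rw [hstep, ih (fun (k : Nat) => PySem.List.pySetD (h k) x (N (starts.getD k 0) x))]

theorem pv_rangefill (V : Int → Int) (nN : Nat) :
    ∀ (fuel : Nat) (s : Nat) (row : List Int), row.length = nN → s + fuel = nN →
    (PySem.List.pyRange (s : Int) (nN : Int) 1).foldl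
        (fun r i => PySem.List.pySetD r i (V i)) row
      = row.take s ++ (PySem.List.pyRange (s : Int) (nN : Int) 1).map V := by
  intro fuel
  induction fuel with
  | zero =>
    intro s row hlen hs
    rw [PySem.List.pyRange_one_eq_nil (by omega)]
    have hle : row.length ≤ s := by omega
    simp [List.take_of_length_le hle]
  | succ m ih =>
    intro s row hlen hs
    have hsn : (s : Int) < (nN : Int) := by omega
    rw [PySem.List.pyRange_one_cons hsn]
    simp only [List.foldl_cons, List.map_cons]
    have hcast : (s : Int) + 1 = ((s + 1 : Nat) : Int) := by push_cast; ring
    rw [PySem.List.pySetD_natCast, hcast]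
    rw [ih (s + 1) (row.set s (V (s : Int))) (by simp [hlen]) (by omega)]
    have hsl : s < row.length := by omega
    have htake : (row.set s (V (s : Int))).take (s + 1) = row.take s ++ [V (s : Int)] := by
      rw [List.set_eq_take_append_cons_drop, if_pos hsl]
      rw [List.take_append]
      have h1 : (row.take s).length = s := by simp [List.length_take]; omega
      rw [List.take_of_length_le (by omega), h1]
      simp
    rw [htake, List.append_assoc, List.singleton_append]

theorem pv_map_range_getD {β : Type} (xs : List Int) (T : Int → β) :
    (List.range xs.length).map (fun (k : Nat) => T (xs.getD k 0)) = xs.map T := by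
  apply List.ext_getElem
  · simp
  · intro k hk1 hk2
    simp only [List.getElem_map, List.getElem_range]
    rw [List.getD_eq_getElem _ _ (by simpa using hk2)]

theorem pv_len_starts (n vs : Int) (hvs : 0 < vs) :
    (PySem.List.pyRange 0 n vs).length = (get_cmprsd_matr_size n vs).toNat := by
  have hne : ¬ (vs = 0) := by omega
  simp only [PySem.List.pyRange, if_neg hne, if_pos hvs, List.length_map, List.length_range]
  unfold get_cmprsd_matr_size
  by_cases hn : 0 < n
  · rw [if_pos hn]
    set q : Int := (n - 0 + vs - 1) / vs with hq
    have hdm := Int.mul_ediv_add_emod (n - 0 + vs - 1) vs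
    have hr0 : 0 ≤ (n - 0 + vs - 1) % vs := Int.emod_nonneg _ (by omega)
    have hrlt : (n - 0 + vs - 1) % vs < vs := Int.emod_lt_of_pos _ hvs
    have heq : -(PySem.Int.floordiv (-n) vs) = q := by
      rw [PySem.Int.neg_floordiv_neg_eq_iff_of_pos hvs]
      constructor <;> nlinarith [hdm, hr0, hrlt]
    rw [heq]
  · rw [if_neg hn]
    have h1 : PySem.Int.floordiv (-n) vs = (-n) / vs := PySem.Int.floordiv_eq_ediv_of_pos hvs
    have h2 : 0 ≤ (-n) / vs := Int.ediv_nonneg (by omega) (by omega)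
    omega

theorem pv_sc_nonpos_neg (n vs : Int) (hvs : vs < 0) (hn : 0 ≤ n) :
    get_cmprsd_matr_size n vs ≤ 0 := by
  unfold get_cmprsd_matr_size
  have h1 : PySem.Int.floordiv (-n) vs = PySem.Int.floordiv n (-vs) := by
    have := PySem.Int.floordiv_neg_neg n (-vs)
    simpa using this
  have h2 : PySem.Int.floordiv n (-vs) = n / (-vs) := PySem.Int.floordiv_eq_ediv_of_pos (by omega)
  have h3 : 0 ≤ n / (-vs) := Int.ediv_nonneg hn (by omega)
  omega

theorem pv_range_neg_nil (n vs : Int) (hvs : vs < 0) (hn : 0 ≤ n) :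
    PySem.List.pyRange 0 n vs = [] := by
  simp only [PySem.List.pyRange, if_neg (by omega : ¬ vs = 0), if_neg (by omega : ¬ 0 < vs),
    if_neg (by omega : ¬ n < 0)]
  simp

theorem pv_enumfill' (F : Int → Int) (xs : List Int) (row : List Int)
    (hlen : row.length = xs.length) :
    (PySem.List.enumerate xs 0).foldl
        (fun r p => PySem.List.pySetD r p.1 (F p.2)) row = xs.map F := by
  have h := pv_enumfill 0 (fun _ b _ => F b) xs 0 row (by simpa using hlen)
  simp only [Nat.cast_zero, List.take_zero, List.nil_append] at h
  rw [h]
  have h2 : (fun (p : Int × Int) => F p.2) = F ∘ (fun (p : Int × Int) => p.2) := rfl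
  rw [h2, ← List.map_map, PySem.List.map_snd_enumerate]

theorem pv_rangefill0 (V : Int → Int) (nN : Nat) (row : List Int) (hlen : row.length = nN) :
    (PySem.List.pyRange 0 (nN : Int) 1).foldl
        (fun r i => PySem.List.pySetD r i (V i)) row
      = (PySem.List.pyRange 0 (nN : Int) 1).map V := by
  have h := pv_rangefill V nN nN 0 row hlen (by omega)
  simpa using h

-- ===== VERDICT (by name: the statement is the Claim_ definition above) =====
theorem get_compressed_matrix_spec : Claim_equal_get_compressed_matrix := by
  intro matrix size_n vs b _dom hpre
  obtain ⟨hvs0, hshape, hneg⟩ := hpre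
  unfold Spec_get_compressed_matrix
  rcases lt_trichotomy vs 0 with hvs | hvs | hvs
  · -- vector_size < 0: both outputs degenerate
    by_cases hn : 0 ≤ size_n
    swap
    · -- size_n < 0 (first layout only): both sides are []
      have hbt : b = true := (hneg hvs).resolve_left hn
      subst hbt
      simp only [get_compressed_matrix, get_compressed_matrix_alt,
        if_neg (by omega : ¬ 0 < vs), if_neg (by omega : ¬ size_n > 0),
        PySem.List.pyRange_one_eq_nil (show size_n ≤ 0 by omega)]
      have hzero : PySem.List.pyRange 0 (0 : Int) 1 = [] := PySem.List.pyRange_one_eq_nil le_rfl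
      have hsn : size_n.toNat = 0 := by omega
      simp [hzero, hsn]
    have hsc : (get_cmprsd_matr_size size_n vs).toNat = 0 := by
      have := pv_sc_nonpos_neg size_n vs hvs hn
      omega
    simp only [get_compressed_matrix, get_compressed_matrix_alt,
      pv_range_neg_nil size_n vs hvs hn, hsc, if_neg (by omega : ¬ 0 < vs)]
    simp only [PySem.List.enumerate_nil, List.foldl_nil]
    rw [PySem.List.foldl_ignore]
    cases b
    · simp
    · simp only [List.replicate_zero, Bool.not_true, Bool.false_eq_true, if_true, if_false]
      simp only [List.map_nil]
      rw [List.map_const', PySem.List.length_pyRange_one]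
      congr 1
      split_ifs <;> omega
  · exact absurd hvs hvs0
  · -- 0 < vector_size
    obtain ⟨hrows, hcols⟩ := hshape hvs
    by_cases hpos : 0 < size_n
    · -- the main case
      have hnN : ((size_n.toNat : Nat) : Int) = size_n := by omega
      have hlen := pv_len_starts size_n vs hvs
      simp only [get_compressed_matrix, get_compressed_matrix_alt,
        if_pos (show size_n > 0 from hpos), if_pos hvs]
      cases b
      · simp only [Bool.false_eq_true, if_false, Bool.not_false, if_true]
        have hnum : ∀ (i j : Int),
            (List.foldl (fun (st : Int × Int) vec_ind =>
                (st.1 + PySem.List.pyGetD (PySem.List.pyGetD matrix vec_ind []) i 0 * 2 ^ st.2.toNat,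
                 st.2 + 1)) ((0 : Int), (0 : Int))
              (PySem.List.pyRange (min (j + vs - 1) (size_n - 1)) (j - 1) (-1))).1
            = pvHorner (fun pos => PySem.List.pyGetD (PySem.List.pyGetD matrix pos []) i 0)
                (PySem.List.pyRange j (min (j + vs) size_n) 1) := by
          intro i j
          rw [pv_pow_fold (fun vec_ind => PySem.List.pyGetD (PySem.List.pyGetD matrix vec_ind []) i 0)
            _ 0 0 le_rfl]
          rw [PySem.List.pyRange_neg_one_eq_reverse, List.reverse_reverse]
          have h1 : (j - 1) + 1 = j := by ring
          have h2 : min (j + vs - 1) (size_n - 1) + 1 = min (j + vs) size_n := by omega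
          rw [h1, h2]
          simp
        simp only [hnum]
        have hconst : ∀ {α : Type} (m : Nat) (x : α),
            List.replicate m x = (List.range m).map (fun _ => x) := by
          intro α m x; rw [List.map_const', List.length_range]
        simp only [hconst]
        rw [pv_second_fold (PySem.List.pyRange 0 size_n vs)
          (fun j i => pvHorner (fun pos => PySem.List.pyGetD (PySem.List.pyGetD matrix pos []) i 0)
            (PySem.List.pyRange j (min (j + vs) size_n) 1))
          (get_cmprsd_matr_size size_n vs).toNat hlen
          (PySem.List.pyRange 0 size_n 1)
          (fun _ => (List.range size_n.toNat).map (fun _ => (0 : Int)))]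
        have hfill : ∀ V : Int → Int,
            (PySem.List.pyRange 0 size_n 1).foldl
                (fun r i => PySem.List.pySetD r i (V i))
                ((List.range size_n.toNat).map (fun _ => (0 : Int)))
              = (PySem.List.pyRange 0 size_n 1).map V := by
          intro V
          have h0 := pv_rangefill0 V size_n.toNat
            ((List.range size_n.toNat).map (fun _ => (0 : Int))) (by simp)
          rw [hnN] at h0
          exact h0
        simp only [hfill]
        rw [← hlen, pv_map_range_getD (PySem.List.pyRange 0 size_n vs)
          (fun j => (PySem.List.pyRange 0 size_n 1).map
            (fun i => pvHorner (fun pos => PySem.List.pyGetD (PySem.List.pyGetD matrix pos []) i 0)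
              (PySem.List.pyRange j (min (j + vs) size_n) 1)))]
        have hstop : ∀ s : Int, (if s + vs < size_n then s + vs else size_n) = min (s + vs) size_n := by
          intro s; split_ifs <;> omega
        simp only [hstop]
        rw [PySem.List.foldl_append_singleton_eq_map, List.nil_append]
        simp only [pv_vecfold (fun q pos => PySem.List.pyGetD (PySem.List.pyGetD matrix pos []) q 0)
          size_n.toNat]
        apply List.map_congr_left
        intro s hs
        rw [PySem.List.pyRange_one 0 size_n, List.map_map]
        have hsub : (size_n - 0).toNat = size_n.toNat := by omega
        rw [hsub]
        apply List.map_congr_left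
        intro r hr
        simp [pvHorner]
      · simp only [if_true, Bool.not_true, Bool.false_eq_true, if_false]
        have hnum : ∀ (i j : Int),
            (List.foldl (fun (st : Int × Int) vec_ind =>
                (st.1 + PySem.List.pyGetD (PySem.List.pyGetD matrix i []) vec_ind 0 * 2 ^ st.2.toNat,
                 st.2 + 1)) ((0 : Int), (0 : Int))
              (PySem.List.pyRange (min (j + vs - 1) (size_n - 1)) (j - 1) (-1))).1
            = pvHorner (fun pos => PySem.List.pyGetD (PySem.List.pyGetD matrix i []) pos 0)
                (PySem.List.pyRange j (min (j + vs) size_n) 1) := by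
          intro i j
          rw [pv_pow_fold (fun vec_ind => PySem.List.pyGetD (PySem.List.pyGetD matrix i []) vec_ind 0)
            _ 0 0 le_rfl]
          rw [PySem.List.pyRange_neg_one_eq_reverse, List.reverse_reverse]
          have h1 : (j - 1) + 1 = j := by ring
          have h2 : min (j + vs - 1) (size_n - 1) + 1 = min (j + vs) size_n := by omega
          rw [h1, h2]
          simp
        simp only [hnum]
        have hconst : ∀ {α : Type} (m : Nat) (x : α),
            List.replicate m x = (List.range m).map (fun _ => x) := by
          intro α m x; rw [List.map_const', List.length_range]
        simp only [hconst]
        rw [pv_first_fold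
          (fun i row => (PySem.List.enumerate (PySem.List.pyRange 0 size_n vs)).foldl
            (fun row p => PySem.List.pySetD row p.1
              (pvHorner (fun pos => PySem.List.pyGetD (PySem.List.pyGetD matrix i []) pos 0)
                (PySem.List.pyRange p.2 (min (p.2 + vs) size_n) 1))) row)
          size_n.toNat _
          (by
            intro h i hi0 hin
            exact pv_set_get_fold _ i hi0 _ _ (by simp; omega))
          (PySem.List.pyRange 0 size_n 1)
          (by
            intro i hi
            rw [PySem.List.mem_pyRange_one] at hi
            omega)
          (fun _ => (List.range (get_cmprsd_matr_size size_n vs).toNat).map (fun _ => (0 : Int)))]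
        rw [List.map_congr_left (l := List.range size_n.toNat) (fun r hr => by
          replace hr := List.mem_range.mp hr
          rw [pv_pick _ size_n r (by omega) _])]
        rw [List.map_congr_left (l := List.range size_n.toNat) (fun r hr => by
          exact pv_enumfill'
            (fun j => pvHorner (fun pos => PySem.List.pyGetD (PySem.List.pyGetD matrix (r : Int) []) pos 0)
              (PySem.List.pyRange j (min (j + vs) size_n) 1))
            (PySem.List.pyRange 0 size_n vs) _ (by simp [hlen]))]
        have hstop : ∀ s : Int, (if s + vs < size_n then s + vs else size_n) = min (s + vs) size_n := by
          intro s; split_ifs <;> omega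
        simp only [hstop]
        rw [PySem.List.foldl_append_singleton_eq_map, List.nil_append]
        simp only [pv_vecfold (fun q pos => PySem.List.pyGetD (PySem.List.pyGetD matrix q []) pos 0)
          size_n.toNat]
        rw [PySem.List.pyRange_one 0 size_n, List.map_map]
        have hsub : (size_n - 0).toNat = size_n.toNat := by omega
        rw [hsub]
        apply List.map_congr_left
        intro r hr
        replace hr := List.mem_range.mp hr
        simp only [Function.comp, zero_add, List.map_map]
        apply List.map_congr_left
        intro s hs
        simp only [Function.comp]
        rw [pv_getD_map_range_int _ size_n.toNat r 0 hr]
        simp [pvHorner]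
    · -- size_n ≤ 0: everything is empty
      have hsc : (get_cmprsd_matr_size size_n vs).toNat = 0 := by
        rw [← pv_len_starts size_n vs hvs]
        simp only [PySem.List.pyRange, if_neg (show ¬ vs = 0 by omega), if_pos hvs,
          if_neg (show ¬ (0:Int) < size_n from hpos), List.length_map, List.length_range]
      have hzero : PySem.List.pyRange 0 (0:Int) vs = [] := by
        simp [PySem.List.pyRange]
      simp only [get_compressed_matrix, get_compressed_matrix_alt, hsc,
        if_neg (show ¬ size_n > 0 from hpos), if_pos hvs, hzero,
        PySem.List.pyRange_one_eq_nil (show size_n ≤ 0 by omega),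
        List.foldl_nil, List.replicate_zero]
      have hsn : size_n.toNat = 0 := by omega
      cases b <;> simp [hsn]
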